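-- pv_equiv track=rewrite | github.com/Adelina2302/HW_manager | HWs/HW5.py | trim_messages_last_n_pairs
-- ===== SOURCE A (Python) =====
-- from typing import List, Tuple, Dict, Any
--
-- def trim_messages_last_n_pairs(messages: List[Dict], n_pairs=5):
--     if n_pairs <= 0:
--         return []
--     tail = []
--     user_count = 0
--     for m in reversed(messages):
--         tail.append(m)
--         if m.get("role") == "user":
--             user_count += 1
--             if user_count >= n_pairs:
--                 break
--     return list(reversed(tail))
-- ===== SOURCE B (Python) =====
-- def trim_messages_last_n_pairs(messages, n_pairs=5):
--     if n_pairs <= 0: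
--         return []
--     user_idx = [i for i, m in enumerate(messages) if m.get("role") == "user"]
--     start = user_idx[-n_pairs] if len(user_idx) >= n_pairs else 0
--     return messages[start:]
-- ===== Notes on version B (the rewrite author's own statement) =====
-- stated objective: simpler
-- what changed: Replaces the reverse early-stopping accumulation loop (append then re-reverse) by building an index table of user messages and returning a single forward slice from the n-th-last user index.
import Mathlib
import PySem

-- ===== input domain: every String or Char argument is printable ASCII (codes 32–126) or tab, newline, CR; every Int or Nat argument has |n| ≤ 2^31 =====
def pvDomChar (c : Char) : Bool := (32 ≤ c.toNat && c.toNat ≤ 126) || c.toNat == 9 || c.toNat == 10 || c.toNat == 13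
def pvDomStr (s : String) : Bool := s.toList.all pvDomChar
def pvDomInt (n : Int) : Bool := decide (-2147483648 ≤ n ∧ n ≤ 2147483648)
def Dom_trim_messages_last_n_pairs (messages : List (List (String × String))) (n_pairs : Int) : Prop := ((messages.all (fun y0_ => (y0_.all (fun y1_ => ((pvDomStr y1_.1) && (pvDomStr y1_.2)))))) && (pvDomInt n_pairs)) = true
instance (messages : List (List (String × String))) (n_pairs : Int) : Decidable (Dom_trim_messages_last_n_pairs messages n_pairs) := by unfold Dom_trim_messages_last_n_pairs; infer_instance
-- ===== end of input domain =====

-- B replaces A's reverse early-stopping accumulation loop by an index table of user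
-- messages plus a single forward slice (objective: simpler decomposition, same cost).

-- shared by both ports: m.get("role") == "user" (dict → assoc list, first-match lookup)
def pvIsUser (m : List (String × String)) : Bool :=
  (PySem.Dict.mk m).get? "role" == some "user"

-- ===== PORT A =====
-- the 'for m in reversed(messages)' loop with accumulator tail and user_count
def trimLoopA (n_pairs : Int) :
    List (List (String × String)) → List (List (String × String)) → Int →
    List (List (String × String))
  | [], tail, _ => tail
  | m :: ms, tail, user_count =>
    if pvIsUser m then
      if user_count + 1 ≥ n_pairs then tail ++ [m]
      else trimLoopA n_pairs ms (tail ++ [m]) (user_count + 1)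
    else trimLoopA n_pairs ms (tail ++ [m]) user_count

def trim_messages_last_n_pairs (messages : List (List (String × String))) (n_pairs : Int) :
    List (List (String × String)) :=
  if n_pairs ≤ 0 then []
  else (trimLoopA n_pairs messages.reverse [] 0).reverse

-- ===== PORT B =====
def trim_messages_last_n_pairs_alt (messages : List (List (String × String))) (n_pairs : Int) :
    List (List (String × String)) :=
  if n_pairs ≤ 0 then []
  else
    let user_idx : List Int :=
      ((PySem.List.enumerate messages 0).filter (fun p => pvIsUser p.2)).map (fun p => p.1)
    let start : Int :=
      if (user_idx.length : Int) ≥ n_pairs then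
        (PySem.List.pyGet? user_idx (-n_pairs)).getD 0  -- in range: len ≥ n_pairs ≥ 1 (getD makes it total)
      else 0
    PySem.List.slice messages (some start) none

-- ===== PRECONDITION & SPEC =====
def Spec_trim_messages_last_n_pairs (messages : List (List (String × String))) (n_pairs : Int) (out : List (List (String × String))) : Prop := out = trim_messages_last_n_pairs_alt messages n_pairs
instance (messages : List (List (String × String))) (n_pairs : Int) (out : List (List (String × String))) : Decidable (Spec_trim_messages_last_n_pairs messages n_pairs out) := by unfold Spec_trim_messages_last_n_pairs; infer_instance

-- ===== CLAIM (what is proved, stated in full; the proofs are below) =====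
def Claim_equal_trim_messages_last_n_pairs : Prop := ∀ (messages : List (List (String × String))) (n_pairs : Int), Dom_trim_messages_last_n_pairs messages n_pairs → Spec_trim_messages_last_n_pairs messages n_pairs (trim_messages_last_n_pairs messages n_pairs)

-- ===== LEMMAS AND PROOFS =====

-- the prefix of xs up to and including the r-th user message (all of xs if fewer)
def tkA : List (List (String × String)) → Int → List (List (String × String))
  | [], _ => []
  | m :: ms, r =>
    if pvIsUser m then (if r ≤ 1 then [m] else m :: tkA ms (r - 1))
    else m :: tkA ms r

-- common spec: the suffix starting at the n-th-last user message
def trimF : List (List (String × String)) → Int → List (List (String × String))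
  | [], _ => []
  | m :: ms, n => if n ≤ (ms.countP pvIsUser : Int) then trimF ms n else m :: ms

-- indices (offset s) of the user messages
def uG : List (List (String × String)) → Int → List Int
  | [], _ => []
  | m :: ms, s => if pvIsUser m then s :: uG ms (s + 1) else uG ms (s + 1)

theorem loopA_eq (n : Int) :
    ∀ (xs : List (List (String × String))) tail (c : Int), c < n →
      trimLoopA n xs tail c = tail ++ tkA xs (n - c) := by
  intro xs
  induction xs with
  | nil => intro tail c _; simp [trimLoopA, tkA]
  | cons m ms ih =>
    intro tail c hc
    by_cases hu : pvIsUser m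
    · by_cases hstop : c + 1 ≥ n
      · have h1 : n - c ≤ 1 := by omega
        simp [trimLoopA, tkA, hu, hstop, h1]
      · have h1 : ¬ (n - c ≤ 1) := by omega
        have := ih (tail ++ [m]) (c + 1) (by omega)
        simp only [trimLoopA, hu, if_true, hstop, if_false, this, tkA, h1]
        have : n - (c + 1) = n - c - 1 := by ring
        simp [this, List.append_assoc]
    · have := ih (tail ++ [m]) c hc
      simp [trimLoopA, tkA, hu, this, List.append_assoc]

theorem tk_snoc (m : List (String × String)) :
    ∀ (xs : List (List (String × String))) (r : Int), 1 ≤ r →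
      tkA (xs ++ [m]) r =
        if r ≤ (xs.countP pvIsUser : Int) then tkA xs r else xs ++ [m] := by
  intro xs
  induction xs with
  | nil =>
    intro r hr
    have h0 : ¬ (r ≤ ((List.countP pvIsUser ([] : List (List (String × String)))) : Int)) := by
      simp; omega
    rw [if_neg h0]
    by_cases hu : pvIsUser m
    · by_cases h1 : r ≤ 1 <;> simp [tkA, hu, h1]
    · simp [tkA, hu]
  | cons x xs ih =>
    intro r hr
    have hx : (x :: xs) ++ [m] = x :: (xs ++ [m]) := rfl
    by_cases hu : pvIsUser x
    · have hcnt : (x :: xs).countP pvIsUser = xs.countP pvIsUser + 1 := by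
        simp [List.countP_cons, hu]
      by_cases h1 : r ≤ 1
      · have hc : r ≤ ((x :: xs).countP pvIsUser : Int) := by rw [hcnt]; push_cast; omega
        rw [if_pos hc, hx]
        simp [tkA, hu, h1]
      · have hrec := ih (r - 1) (by omega)
        by_cases h2 : r - 1 ≤ (xs.countP pvIsUser : Int)
        · have hc : r ≤ ((x :: xs).countP pvIsUser : Int) := by rw [hcnt]; push_cast; omega
          rw [if_pos hc, hx]
          rw [if_pos h2] at hrec
          simp [tkA, hu, h1, hrec]
        · have hc : ¬ r ≤ ((x :: xs).countP pvIsUser : Int) := by rw [hcnt]; push_cast; omega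
          rw [if_neg hc, hx]
          rw [if_neg h2] at hrec
          simp [tkA, hu, h1, hrec]
    · have hcnt : (x :: xs).countP pvIsUser = xs.countP pvIsUser := by
        simp [List.countP_cons, hu]
      have hrec := ih r hr
      by_cases h2 : r ≤ (xs.countP pvIsUser : Int)
      · have hc : r ≤ ((x :: xs).countP pvIsUser : Int) := by rw [hcnt]; exact h2
        rw [if_pos hc, hx]
        rw [if_pos h2] at hrec
        simp [tkA, hu, hrec]
      · have hc : ¬ r ≤ ((x :: xs).countP pvIsUser : Int) := by rw [hcnt]; exact h2
        rw [if_neg hc, hx]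
        rw [if_neg h2] at hrec
        simp [tkA, hu, hrec]

theorem A_eq_trimF (n : Int) (hn : 1 ≤ n) :
    ∀ messages : List (List (String × String)),
      (tkA messages.reverse n).reverse = trimF messages n := by
  intro messages
  induction messages with
  | nil => simp [tkA, trimF]
  | cons m ms ih =>
    have hs : (m :: ms).reverse = ms.reverse ++ [m] := by simp
    rw [hs, tk_snoc m ms.reverse n hn]
    by_cases h : n ≤ (ms.reverse.countP pvIsUser : Int)
    · have h' : n ≤ (ms.countP pvIsUser : Int) := by
        simpa [List.countP_reverse] using h
      simp [h, trimF, h', ih]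
    · have h' : ¬ n ≤ (ms.countP pvIsUser : Int) := by
        simpa [List.countP_reverse] using h
      simp [h, trimF, h']

theorem uG_len : ∀ (xs : List (List (String × String))) (s : Int),
    (uG xs s).length = xs.countP pvIsUser := by
  intro xs
  induction xs with
  | nil => intro s; simp [uG]
  | cons m ms ih =>
    intro s
    by_cases hu : pvIsUser m <;> simp [uG, hu, List.countP_cons, ih]

theorem uG_mem_ge : ∀ (xs : List (List (String × String))) (s x : Int),
    x ∈ uG xs s → s ≤ x := by
  intro xs
  induction xs with
  | nil => intro s x h; simp [uG] at h
  | cons m ms ih =>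
    intro s x h
    by_cases hu : pvIsUser m
    · simp [uG, hu] at h
      rcases h with h | h
      · omega
      · have := ih (s + 1) x h; omega
    · simp [uG, hu] at h
      have := ih (s + 1) x h; omega

theorem enum_filter : ∀ (xs : List (List (String × String))) (s : Int),
    ((PySem.List.enumerate xs s).filter (fun p => pvIsUser p.2)).map (fun p => p.1) = uG xs s := by
  intro xs
  induction xs with
  | nil => intro s; simp [PySem.List.enumerate_nil, uG]
  | cons m ms ih =>
    intro s
    rw [PySem.List.enumerate_cons]
    by_cases hu : pvIsUser m <;> simp [uG, hu, List.filter_cons, ih]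

theorem trimF_all (n : Int) : ∀ xs : List (List (String × String)),
    (xs.countP pvIsUser : Int) < n → trimF xs n = xs := by
  intro xs
  induction xs with
  | nil => intro h; simp [trimF]
  | cons m ms ih =>
    intro h
    have h' : ¬ n ≤ (ms.countP pvIsUser : Int) := by
      have hcc : (m :: ms).countP pvIsUser = ms.countP pvIsUser + (if pvIsUser m then 1 else 0) := by
        simp [List.countP_cons]
      split_ifs at hcc <;> omega
    simp [trimF, h']

theorem Bmain (n : Int) (hn : 1 ≤ n) :
    ∀ (xs : List (List (String × String))) (s : Int),
      n ≤ ((uG xs s).length : Int) →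
      PySem.List.slice xs (some ((PySem.List.pyGet? (uG xs s) (-n)).getD 0 - s)) none
        = trimF xs n := by
  intro xs
  induction xs with
  | nil => intro s h; simp [uG] at h; omega
  | cons m ms ih =>
    intro s hlen
    have hk' : -n = -((n.toNat : Nat) : Int) := by omega
    by_cases hu : pvIsUser m
    · have hguG : uG (m :: ms) s = s :: uG ms (s + 1) := by simp [uG, hu]
      rw [hguG] at hlen ⊢
      set l := uG ms (s + 1) with hl
      by_cases h2 : n ≤ (l.length : Int)
      · -- enough users remain after m: drop m and recurse
        have hkl : n.toNat ≤ l.length := by omega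
        have hkpos : 0 < n.toNat := by omega
        rw [hk', PySem.List.pyGet?_neg_natCast _ _ hkpos (by simp; omega)]
        have hidx : (s :: l).length - n.toNat = (l.length - n.toNat) + 1 := by
          simp; omega
        rw [hidx]
        rw [List.getElem?_cons_succ]
        have hlt : l.length - n.toNat < l.length := by omega
        rw [List.getElem?_eq_getElem hlt]
        set v := l[l.length - n.toNat] with hv
        have hvmem : v ∈ l := List.getElem_mem hlt
        have hvge : s + 1 ≤ v := uG_mem_ge ms (s + 1) v hvmem
        have hrhs : trimF (m :: ms) n = trimF ms n := by
          have : n ≤ (ms.countP pvIsUser : Int) := by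
            rw [← uG_len ms (s + 1)]; exact h2
          simp [trimF, this]
        rw [hrhs]
        have hIH := ih (s + 1) (by rw [← hl]; exact h2)
        rw [hk', PySem.List.pyGet?_neg_natCast _ _ hkpos hkl] at hIH
        rw [List.getElem?_eq_getElem hlt] at hIH
        simp only [Option.getD_some] at hIH ⊢
        rw [← hv] at hIH
        rw [PySem.List.slice_from ms (show (0 : Int) ≤ v - (s + 1) by omega)] at hIH
        rw [PySem.List.slice_from (m :: ms) (show (0 : Int) ≤ v - s by omega)]
        have hnat : (v - s).toNat = (v - (s + 1)).toNat + 1 := by omega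
        rw [hnat, List.drop_succ_cons]
        exact hIH
      · -- m is the n-th-last user: keep everything from m on
        have hlen' : (l.length : Int) + 1 = n := by simp at hlen; omega
        have hkpos : 0 < n.toNat := by omega
        rw [hk', PySem.List.pyGet?_neg_natCast _ _ hkpos (by simp; omega)]
        have hidx : (s :: l).length - n.toNat = 0 := by simp; omega
        rw [hidx]
        simp only [List.getElem?_cons_zero, Option.getD_some, sub_self]
        have hrhs : trimF (m :: ms) n = m :: ms := by
          have : ¬ n ≤ (ms.countP pvIsUser : Int) := by
            rw [← uG_len ms (s + 1)]; omega
          simp [trimF, this]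
        rw [hrhs]
        simp [PySem.List.slice]
    · have hguG : uG (m :: ms) s = uG ms (s + 1) := by simp [uG, hu]
      rw [hguG] at hlen ⊢
      set l := uG ms (s + 1) with hl
      have hkl : n.toNat ≤ l.length := by omega
      have hkpos : 0 < n.toNat := by omega
      rw [hk', PySem.List.pyGet?_neg_natCast _ _ hkpos hkl]
      have hlt : l.length - n.toNat < l.length := by omega
      rw [List.getElem?_eq_getElem hlt]
      set v := l[l.length - n.toNat] with hv
      have hvmem : v ∈ l := List.getElem_mem hlt
      have hvge : s + 1 ≤ v := uG_mem_ge ms (s + 1) v hvmem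
      have hrhs : trimF (m :: ms) n = trimF ms n := by
        have : n ≤ (ms.countP pvIsUser : Int) := by
          rw [← uG_len ms (s + 1)]; omega
        simp [trimF, this]
      rw [hrhs]
      have hIH := ih (s + 1) (by rw [← hl]; omega)
      rw [hk', PySem.List.pyGet?_neg_natCast _ _ hkpos hkl] at hIH
      rw [List.getElem?_eq_getElem hlt] at hIH
      simp only [Option.getD_some] at hIH ⊢
      rw [← hv] at hIH
      rw [PySem.List.slice_from ms (show (0 : Int) ≤ v - (s + 1) by omega)] at hIH
      rw [PySem.List.slice_from (m :: ms) (show (0 : Int) ≤ v - s by omega)]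
      have hnat : (v - s).toNat = (v - (s + 1)).toNat + 1 := by omega
      rw [hnat, List.drop_succ_cons]
      exact hIH

-- ===== VERDICT (by name: the statement is the Claim_ definition above) =====
theorem trim_messages_last_n_pairs_spec : Claim_equal_trim_messages_last_n_pairs := by
  intro messages n_pairs _
  unfold Spec_trim_messages_last_n_pairs trim_messages_last_n_pairs trim_messages_last_n_pairs_alt
  by_cases h0 : n_pairs ≤ 0
  · simp [h0]
  · have hn : 1 ≤ n_pairs := by omega
    simp only [h0, if_false]
    have hA : (trimLoopA n_pairs messages.reverse [] 0).reverse = trimF messages n_pairs := by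
      rw [loopA_eq n_pairs messages.reverse [] 0 (by omega)]
      simp only [List.nil_append, sub_zero]
      exact A_eq_trimF n_pairs hn messages
    rw [hA, enum_filter messages 0]
    have hlen := uG_len messages 0
    by_cases hc : ((uG messages 0).length : Int) ≥ n_pairs
    · rw [if_pos hc]
      have hB := Bmain n_pairs hn messages 0 (by omega)
      simp only [sub_zero] at hB
      exact hB.symm
    · rw [if_neg hc]
      rw [PySem.List.slice_from messages (by omega : (0 : Int) ≤ 0)]
      simp only [Int.toNat_zero, List.drop_zero]
      exact trimF_all n_pairs messages (by omega)
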